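-- pv_equiv track=rewrite | github.com/drithird/AdventofCode | adventofcode/day2/pt2.py | get_results_from_cycle
-- ===== SOURCE A (Python) =====
-- def get_results_from_cycle(cycle: str):
--     pulling_data = False
--     value = None
--     results = []
--     current_digits = []
--     for character in cycle:
--         if pulling_data == True:
--             if character.isalpha():
--                 num=''
--                 for char in current_digits:
--                     num += char
--                 results.append((int(num),character))
--                 current_digits = []
--                 pulling_data = False
--             elif character.isdigit():
--                 current_digits.append(character)
--         elif character.isdigit():
--             pulling_data = True
--             current_digits.append(character)
--
--     return results
-- ===== SOURCE B (Python) =====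
-- def get_results_from_cycle(cycle: str):
--     # Run-based scan: walk maximal runs of one character class instead of a
--     # per-character pulling_data state machine; pending digit runs live in buf.
--     def key(c):
--         if c.isdigit():
--             return 'd'
--         if c.isalpha():
--             return 'a'
--         return 'o'
--
--     results = []
--     buf = []  # pending digit runs; nonempty buf <=> a number is being collected
--     i = 0
--     n = len(cycle)
--     while i < n:
--         k = key(cycle[i])
--         j = i + 1
--         while j < n and key(cycle[j]) == k:
--             j += 1
--         if k == 'd':
--             buf.append(cycle[i:j])
--         elif k == 'a' and buf:
--             results.append((int(''.join(buf)), cycle[i]))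
--             buf = []
--         i = j
--     return results
-- ===== Notes on version B (the rewrite author's own statement) =====
-- stated objective: alternative
-- what changed: Replaces the per-character pulling_data state machine by a scan over maximal character-class runs: a whole digit run is buffered at once and a whole alpha run emits one pair from its first character, with the boolean flag replaced by buffer non-emptiness.
import Mathlib
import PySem

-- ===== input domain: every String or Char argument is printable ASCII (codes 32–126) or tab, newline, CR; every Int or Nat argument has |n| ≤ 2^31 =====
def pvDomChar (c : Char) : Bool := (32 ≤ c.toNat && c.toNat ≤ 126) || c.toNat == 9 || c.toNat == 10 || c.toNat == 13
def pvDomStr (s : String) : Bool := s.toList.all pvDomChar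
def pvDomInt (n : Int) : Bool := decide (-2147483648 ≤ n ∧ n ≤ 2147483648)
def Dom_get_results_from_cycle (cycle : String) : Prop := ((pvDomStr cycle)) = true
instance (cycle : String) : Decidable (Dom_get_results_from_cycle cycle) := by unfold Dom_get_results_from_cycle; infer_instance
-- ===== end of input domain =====

-- B replaces A's per-character pulling_data state machine by a scan over maximal
-- character-class runs (alternative decomposition, same O(n) cost).


-- ===== PORT A =====
-- A's loop body; strings of collected digit characters are represented as List Char
-- (current_digits is a list of single characters; num is built by the inner += loop).
def pvStepA (s : Bool × List Char × List (Int × String)) (c : Char) :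
    Bool × List Char × List (Int × String) :=
  if s.1 = true then
    if PySem.Chars.isalpha c then
      -- num = ''; for char in current_digits: num += char
      let num : List Char := s.2.1.foldl (fun acc ch => acc ++ [ch]) []
      -- int(num): num is a nonempty list of ASCII digits here, so ofChars? is some
      (false, [], s.2.2 ++ [((PySem.Int.ofChars? num).getD 0, String.ofList [c])])
    else if PySem.Chars.isdigit c then (s.1, s.2.1 ++ [c], s.2.2)
    else s
  else if PySem.Chars.isdigit c then (true, s.2.1 ++ [c], s.2.2)
  else s

def get_results_from_cycle (cycle : String) : List (Int × String) :=
  (cycle.toList.foldl pvStepA (false, ([] : List Char), ([] : List (Int × String)))).2.2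

-- ===== PORT B =====
-- B's character-class key
def pvKeyB (c : Char) : Char :=
  if PySem.Chars.isdigit c then 'd' else if PySem.Chars.isalpha c then 'a' else 'o'

-- B's outer while loop: split the input into maximal runs of one class
-- (the inner `while j < n and key(cycle[j]) == k` scan is the takeWhile/dropWhile).
def pvRunsB : List Char → List (Char × List Char)
  | [] => []
  | c :: cs =>
      (pvKeyB c, c :: cs.takeWhile (fun x => pvKeyB x == pvKeyB c)) ::
      pvRunsB (cs.dropWhile (fun x => pvKeyB x == pvKeyB c))
termination_by l => l.length
decreasing_by
  exact Nat.lt_succ_of_le (List.length_dropWhile_le _ _)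

-- B's per-run body; buf is the list of pending digit runs, ''.join(buf) is flatten
def pvStepB (s : List (List Char) × List (Int × String)) (kr : Char × List Char) :
    List (List Char) × List (Int × String) :=
  if kr.1 = 'd' then (s.1 ++ [kr.2], s.2)
  else if kr.1 = 'a' ∧ s.1 ≠ [] then
    match kr.2 with
    | [] => s  -- unreachable: runs produced by pvRunsB are nonempty
    | c :: _ => ([], s.2 ++ [((PySem.Int.ofChars? s.1.flatten).getD 0, String.ofList [c])])
  else s

def get_results_from_cycle_alt (cycle : String) : List (Int × String) :=
  ((pvRunsB cycle.toList).foldl pvStepB ([], [])).2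

-- ===== PRECONDITION & SPEC =====
def Spec_get_results_from_cycle (cycle : String) (out : List (Int × String)) : Prop := out = get_results_from_cycle_alt cycle
instance (cycle : String) (out : List (Int × String)) : Decidable (Spec_get_results_from_cycle cycle out) := by unfold Spec_get_results_from_cycle; infer_instance

-- ===== CLAIM (what is proved, stated in full; the proofs are below) =====
def Claim_equal_get_results_from_cycle : Prop := ∀ (cycle : String), Dom_get_results_from_cycle cycle → Spec_get_results_from_cycle cycle (get_results_from_cycle cycle)

-- ===== LEMMAS AND PROOFS =====

theorem pv_dig_not_alpha (c : Char) (h : PySem.Chars.isdigit c = true) :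
    PySem.Chars.isalpha c = false := by
  revert h
  simp [PySem.Chars.isdigit, PySem.Chars.isalpha, PySem.Chars.isupper, PySem.Chars.islower,
    Char.le_def, UInt32.le_iff_toNat_le]
  intro h1 h2
  constructor <;> intro h3 <;> omega

theorem pv_key_d (c : Char) (h : pvKeyB c = 'd') : PySem.Chars.isdigit c = true := by
  unfold pvKeyB at h; split_ifs at h with h1 h2 <;> simp_all

theorem pv_key_a (c : Char) (h : pvKeyB c = 'a') :
    PySem.Chars.isalpha c = true ∧ PySem.Chars.isdigit c = false := by
  unfold pvKeyB at h; split_ifs at h with h1 h2 <;> simp_all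

theorem pv_key_o (c : Char) (h : pvKeyB c = 'o') :
    PySem.Chars.isdigit c = false ∧ PySem.Chars.isalpha c = false := by
  unfold pvKeyB at h; split_ifs at h with h1 h2 <;> simp_all

theorem pv_key_cases (c : Char) : pvKeyB c = 'd' ∨ pvKeyB c = 'a' ∨ pvKeyB c = 'o' := by
  unfold pvKeyB; split_ifs <;> simp

theorem pv_stepA_digit (c : Char) (hc : PySem.Chars.isdigit c = true)
    (p : Bool) (d : List Char) (res : List (Int × String)) :
    pvStepA (p, d, res) c = (true, d ++ [c], res) := by
  unfold pvStepA
  cases p <;> simp [hc, pv_dig_not_alpha c hc]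

theorem pv_stepA_skip (c : Char) (hd : PySem.Chars.isdigit c = false)
    (ha : PySem.Chars.isalpha c = false) (s : Bool × List Char × List (Int × String)) :
    pvStepA s c = s := by
  unfold pvStepA
  rcases s with ⟨p, d, res⟩
  cases p <;> simp [hd, ha]

theorem pv_foldl_snoc (l : List Char) : ∀ acc : List Char,
    l.foldl (fun acc ch => acc ++ [ch]) acc = acc ++ l := by
  induction l with
  | nil => simp
  | cons c cs ih => intro acc; simp [List.foldl, ih]

theorem pv_foldA_digits (l : List Char) (h : ∀ x ∈ l, PySem.Chars.isdigit x = true) :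
    ∀ (d : List Char) (res : List (Int × String)),
    l.foldl pvStepA (true, d, res) = (true, d ++ l, res) := by
  induction l with
  | nil => simp
  | cons c cs ih =>
      intro d res
      have hc : PySem.Chars.isdigit c = true := h c (by simp)
      simp only [List.foldl, pv_stepA_digit c hc]
      rw [ih (fun x hx => h x (by simp [hx]))]
      simp

theorem pv_foldA_skip (l : List Char)
    (h : ∀ x ∈ l, PySem.Chars.isdigit x = false ∧ PySem.Chars.isalpha x = false) :
    ∀ s : Bool × List Char × List (Int × String), l.foldl pvStepA s = s := by
  induction l with
  | nil => simp
  | cons c cs ih =>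
      intro s
      have hc := h c (by simp)
      simp only [List.foldl, pv_stepA_skip c hc.1 hc.2]
      exact ih (fun x hx => h x (by simp [hx])) s

theorem pv_foldA_alpha_false (l : List Char) (h : ∀ x ∈ l, PySem.Chars.isalpha x = true) :
    ∀ (d : List Char) (res : List (Int × String)),
    l.foldl pvStepA (false, d, res) = (false, d, res) := by
  induction l with
  | nil => simp
  | cons c cs ih =>
      intro d res
      have hc : PySem.Chars.isalpha c = true := h c (by simp)
      have hd : PySem.Chars.isdigit c = false := by
        by_contra hcontra
        have := pv_dig_not_alpha c (by revert hcontra; cases PySem.Chars.isdigit c <;> simp)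
        simp [hc] at this
      have : pvStepA (false, d, res) c = (false, d, res) := by
        unfold pvStepA; simp [hd]
      simp only [List.foldl, this]
      exact ih (fun x hx => h x (by simp [hx])) d res

-- main invariant: A's fold over l from the A-state corresponding to B-state (buf, res)
-- equals B's fold over the runs of l, and every run stored in buf stays nonempty
theorem pv_foldA_digit_run (c : Char) (t : List Char) (hc : PySem.Chars.isdigit c = true)
    (ht : ∀ x ∈ t, PySem.Chars.isdigit x = true)
    (p : Bool) (d : List Char) (res : List (Int × String)) :
    (c :: t).foldl pvStepA (p, d, res) = (true, d ++ (c :: t), res) := by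
  simp only [List.foldl_cons, pv_stepA_digit c hc]
  rw [pv_foldA_digits t ht]
  simp

theorem pv_main : ∀ (n : Nat) (l : List Char), l.length ≤ n →
    ∀ (buf : List (List Char)) (res : List (Int × String)), (∀ r ∈ buf, r ≠ []) →
    (l.foldl pvStepA (decide (buf ≠ []), buf.flatten, res)
      = (decide (((pvRunsB l).foldl pvStepB (buf, res)).1 ≠ []),
         ((pvRunsB l).foldl pvStepB (buf, res)).1.flatten,
         ((pvRunsB l).foldl pvStepB (buf, res)).2))
    ∧ (∀ r ∈ ((pvRunsB l).foldl pvStepB (buf, res)).1, r ≠ []) := by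
  intro n
  induction n with
  | zero =>
      intro l hl buf res hbuf
      have hnil : l = [] := List.length_eq_zero_iff.mp (Nat.le_zero.mp hl)
      subst hnil
      have hr : pvRunsB [] = [] := by rw [pvRunsB]
      rw [hr]
      exact ⟨rfl, hbuf⟩
  | succ n ih =>
      intro l hl buf res hbuf
      match l with
      | [] =>
          have hr : pvRunsB [] = [] := by rw [pvRunsB]
          rw [hr]
          exact ⟨rfl, hbuf⟩
      | c :: cs =>
          have hcs : cs.length ≤ n := by simpa using Nat.succ_le_succ_iff.mp hl
          set p := fun x => pvKeyB x == pvKeyB c with hp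
          have hsplit : cs = cs.takeWhile p ++ cs.dropWhile p :=
            (List.takeWhile_append_dropWhile (p := p) (l := cs)).symm
          have htake : ∀ x ∈ cs.takeWhile p, pvKeyB x = pvKeyB c := by
            intro x hx
            have := List.mem_takeWhile_imp hx
            simpa [hp] using this
          have hdrop_len : (cs.dropWhile p).length ≤ n :=
            le_trans (List.length_dropWhile_le _ _) hcs
          have hruns : pvRunsB (c :: cs)
              = (pvKeyB c, c :: cs.takeWhile p) :: pvRunsB (cs.dropWhile p) := by
            rw [pvRunsB]
          have hfoldA : (c :: cs).foldl pvStepA (decide (buf ≠ []), buf.flatten, res)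
              = (cs.dropWhile p).foldl pvStepA
                  ((c :: cs.takeWhile p).foldl pvStepA (decide (buf ≠ []), buf.flatten, res)) := by
            conv_lhs => rw [show (c :: cs) = (c :: cs.takeWhile p) ++ cs.dropWhile p by
              rw [List.cons_append, ← hsplit]]
            rw [List.foldl_append]
          rcases pv_key_cases c with hk | hk | hk
          · -- digit run
            have hcdig : PySem.Chars.isdigit c = true := pv_key_d c hk
            have htdig : ∀ x ∈ cs.takeWhile p, PySem.Chars.isdigit x = true := by
              intro x h
              exact pv_key_d x (by rw [htake x h]; exact hk)
            have hrun := pv_foldA_digit_run c (cs.takeWhile p) hcdig htdig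
              (decide (buf ≠ [])) buf.flatten res
            have hstepB : pvStepB (buf, res) (pvKeyB c, c :: cs.takeWhile p)
                = (buf ++ [c :: cs.takeWhile p], res) := by
              unfold pvStepB; simp [hk]
            have hbuf2 : ∀ r ∈ buf ++ [c :: cs.takeWhile p], r ≠ [] := by
              intro r hr
              rcases List.mem_append.mp hr with h | h
              · exact hbuf r h
              · simp at h; simp [h]
            have hIH := ih (cs.dropWhile p) hdrop_len (buf ++ [c :: cs.takeWhile p]) res hbuf2
            have hstate : ((true, buf.flatten ++ (c :: cs.takeWhile p), res)
                : Bool × List Char × List (Int × String))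
                = (decide ((buf ++ [c :: cs.takeWhile p]) ≠ []),
                    (buf ++ [c :: cs.takeWhile p]).flatten, res) := by
              simp
            rw [hfoldA, hrun, hstate, hruns]
            simp only [List.foldl_cons, hstepB]
            exact hIH
          · -- alpha run
            have hca := pv_key_a c hk
            have hta : ∀ x ∈ cs.takeWhile p, PySem.Chars.isalpha x = true := by
              intro x h
              exact (pv_key_a x (by rw [htake x h]; exact hk)).1
            by_cases hb : buf = []
            · -- not collecting: whole run is skipped on both sides
              subst hb
              have hrun : (c :: cs.takeWhile p).foldl pvStepA
                    (decide (([] : List (List Char)) ≠ []),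
                     List.flatten ([] : List (List Char)), res)
                  = (decide (([] : List (List Char)) ≠ []),
                     List.flatten ([] : List (List Char)), res) := by
                have := pv_foldA_alpha_false (c :: cs.takeWhile p)
                  (by intro x hx
                      rcases List.mem_cons.mp hx with h | h
                      · rw [h]; exact hca.1
                      · exact hta x h) [] res
                simpa using this
              have hstepB : pvStepB ([], res) (pvKeyB c, c :: cs.takeWhile p) = ([], res) := by
                unfold pvStepB; simp [hk]
              have hIH := ih (cs.dropWhile p) hdrop_len [] res (by simp)
              rw [hfoldA, hrun, hruns]
              simp only [List.foldl_cons, hstepB]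
              exact hIH
            · -- collecting: the first alpha char emits, the rest of the run is skipped
              have hpt : (decide (buf ≠ []) : Bool) = true := by simp [hb]
              have hnum : buf.flatten.foldl (fun acc ch => acc ++ [ch]) [] = buf.flatten := by
                simpa using pv_foldl_snoc buf.flatten []
              have hemit : pvStepA (decide (buf ≠ []), buf.flatten, res) c
                  = (false, [],
                     res ++ [((PySem.Int.ofChars? buf.flatten).getD 0, String.ofList [c])]) := by
                rw [hpt]
                unfold pvStepA
                rw [if_pos rfl, if_pos hca.1, hnum]
              have hrest : (cs.takeWhile p).foldl pvStepA
                    (false, [],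
                     res ++ [((PySem.Int.ofChars? buf.flatten).getD 0, String.ofList [c])])
                  = (false, [],
                     res ++ [((PySem.Int.ofChars? buf.flatten).getD 0, String.ofList [c])]) :=
                pv_foldA_alpha_false _ hta _ _
              have hstepB : pvStepB (buf, res) (pvKeyB c, c :: cs.takeWhile p)
                  = ([], res ++ [((PySem.Int.ofChars? buf.flatten).getD 0, String.ofList [c])]) := by
                unfold pvStepB; simp [hk, hb]
              have hIH := ih (cs.dropWhile p) hdrop_len []
                (res ++ [((PySem.Int.ofChars? buf.flatten).getD 0, String.ofList [c])]) (by simp)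
              rw [hfoldA]
              simp only [List.foldl_cons, hemit]
              rw [hrest, hruns]
              simp only [List.foldl_cons, hstepB]
              simpa using hIH
          · -- other run: skipped on both sides
            have hco := pv_key_o c hk
            have hallo : ∀ x ∈ c :: cs.takeWhile p,
                PySem.Chars.isdigit x = false ∧ PySem.Chars.isalpha x = false := by
              intro x hx
              rcases List.mem_cons.mp hx with h | h
              · rw [h]; exact hco
              · exact pv_key_o x (by rw [htake x h]; exact hk)
            have hrun : (c :: cs.takeWhile p).foldl pvStepA
                  (decide (buf ≠ []), buf.flatten, res)
                = (decide (buf ≠ []), buf.flatten, res) :=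
              pv_foldA_skip _ hallo _
            have hstepB : pvStepB (buf, res) (pvKeyB c, c :: cs.takeWhile p) = (buf, res) := by
              unfold pvStepB; simp [hk]
            have hIH := ih (cs.dropWhile p) hdrop_len buf res hbuf
            rw [hfoldA, hrun, hruns]
            simp only [List.foldl_cons, hstepB]
            exact hIH

-- ===== VERDICT (by name: the statement is the Claim_ definition above) =====
theorem get_results_from_cycle_spec : Claim_equal_get_results_from_cycle := by
  intro cycle _
  unfold Spec_get_results_from_cycle get_results_from_cycle get_results_from_cycle_alt
  have h := (pv_main cycle.toList.length cycle.toList le_rfl [] [] (by simp)).1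
  simp only [ne_eq, not_true_eq_false, decide_false, List.flatten_nil] at h
  rw [h]
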